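-- pv_equiv track=rewrite | github.com/marcchen2/yahtzee_qlearning | yahtzee.py | all_possible_keep_patterns
-- ===== SOURCE A (Python) =====
-- import itertools
--
-- def all_possible_keep_patterns(dice):
--     """Generate all unique value-based keep patterns for current dice"""
--     patterns = set()
--     counts = {num: dice.count(num) for num in set(dice)}
--
--     # Generate possible value combinations
--     for num in counts:
--         for keep_count in range(counts[num] + 1):
--             if keep_count == 0:
--                 continue
--             # Generate mask for this value count
--             pattern = []
--             kept = 0
--             for d in dice:
--                 if d == num and kept < keep_count:
--                     pattern.append(True)
--                     kept += 1
--                 else: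
--                     pattern.append(False)
--             patterns.add(tuple(pattern))
--
--     # Add combinations with multiple numbers
--     for combo in itertools.combinations(set(dice), 2):
--         for count1 in range(1, dice.count(combo[0]) + 1):
--             for count2 in range(1, dice.count(combo[1]) + 1):
--                 pattern = []
--                 kept1 = kept2 = 0
--                 for d in dice:
--                     if d == combo[0] and kept1 < count1:
--                         pattern.append(True)
--                         kept1 += 1
--                     elif d == combo[1] and kept2 < count2:
--                         pattern.append(True)
--                         kept2 += 1
--                     else:
--                         pattern.append(False)
--                 patterns.add(tuple(pattern))
--
--     return [list(p) for p in patterns]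
-- ===== SOURCE B (Python) =====
-- import itertools
--
-- def all_possible_keep_patterns(dice):
--     """Generate all unique value-based keep patterns for current dice"""
--     n = len(dice)
--     # positions of each distinct value, in first-occurrence order
--     pos = {}
--     i = 0
--     for d in dice:
--         if d in pos:
--             pos[d] = pos[d] + [i]
--         else:
--             pos[d] = [i]
--         i += 1
--     # masks[v][k-1] = mask keeping the first k occurrences of v
--     masks = {}
--     for v in pos:
--         fam = []
--         m = [False] * n
--         for p in pos[v]:
--             m = m + []
--             m[p] = True
--             fam.append(m)
--         masks[v] = fam
--     patterns = set()
--     for v in masks: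
--         for m in masks[v]:
--             patterns.add(tuple(m))
--     for v1, v2 in itertools.combinations(list(pos), 2):
--         for m1 in masks[v1]:
--             for m2 in masks[v2]:
--                 patterns.add(tuple(a or b for a, b in zip(m1, m2)))
--     return [list(p) for p in patterns]
-- ===== Notes on version B (the rewrite author's own statement) =====
-- stated objective: alternative
-- what changed: Instead of rescanning the whole dice list (with per-element value/counter tests) to rebuild every pattern and calling dice.count repeatedly, B records each value's positions in one pass, builds each value's prefix-keep masks incrementally (each mask extends the previous by one set bit), and forms pair patterns by OR-zipping two precomputed masks.
import Mathlib
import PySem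

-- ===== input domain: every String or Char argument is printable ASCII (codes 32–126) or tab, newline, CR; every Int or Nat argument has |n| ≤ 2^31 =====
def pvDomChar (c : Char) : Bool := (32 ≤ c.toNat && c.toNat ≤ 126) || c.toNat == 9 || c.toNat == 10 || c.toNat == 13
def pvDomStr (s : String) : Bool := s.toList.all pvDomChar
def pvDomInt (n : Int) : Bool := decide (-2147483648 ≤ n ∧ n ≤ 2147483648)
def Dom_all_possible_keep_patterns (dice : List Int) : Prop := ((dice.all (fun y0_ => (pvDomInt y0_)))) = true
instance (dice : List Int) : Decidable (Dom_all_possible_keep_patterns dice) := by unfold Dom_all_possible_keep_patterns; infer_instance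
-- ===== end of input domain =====

-- B replaces A's per-pattern rescans of `dice` (and its repeated dice.count calls) by per-value
-- position lists and precomputed prefix masks that are OR-combined; the Python outputs agree as
-- sets of patterns (both functions return the contents of a Python set; the ports fix the
-- insertion-order representative and are proved equal element-for-element).

-- ===== PORT A =====
-- inner loop of the single-value pattern: state (pattern, kept)
def pvScan1 (dice : List Int) (num keep : Int) : List Bool × Int :=
  dice.foldl (fun st d =>
    if d == num && st.2 < keep then (st.1 ++ [true], st.2 + 1)
    else (st.1 ++ [false], st.2)) ([], 0)

-- inner loop of the pair pattern: state (pattern, kept1, kept2)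
def pvScan2 (dice : List Int) (v1 v2 c1 c2 : Int) : List Bool × Int × Int :=
  dice.foldl (fun st d =>
    if d == v1 && st.2.1 < c1 then (st.1 ++ [true], st.2.1 + 1, st.2.2)
    else if d == v2 && st.2.2 < c2 then (st.1 ++ [true], st.2.1, st.2.2 + 1)
    else (st.1 ++ [false], st.2)) ([], 0, 0)

def all_possible_keep_patterns (dice : List Int) : List (List Bool) :=
  let dset : PySem.Set Int := PySem.Set.ofList dice
  let counts : PySem.Dict Int Int :=
    dset.foldl (fun d num => d.insert num ((PySem.List.count dice num : Nat) : Int)) PySem.Dict.empty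
  let pats1 : PySem.Set (List Bool) :=
    counts.keys.foldl (fun pats num =>
      (PySem.List.pyRange 0 (counts.getD num 0 + 1)).foldl (fun pats keep_count =>
        if keep_count == 0 then pats else PySem.Set.add pats (pvScan1 dice num keep_count).1) pats)
      PySem.Set.empty
  let pats2 : PySem.Set (List Bool) :=
    (PySem.List.combinations dset 2).foldl (fun pats combo =>
      (PySem.List.pyRange 1 (((PySem.List.count dice (PySem.List.pyGetD combo 0 0) : Nat) : Int) + 1)).foldl (fun pats count1 =>
        (PySem.List.pyRange 1 (((PySem.List.count dice (PySem.List.pyGetD combo 1 0) : Nat) : Int) + 1)).foldl (fun pats count2 =>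
          PySem.Set.add pats (pvScan2 dice (PySem.List.pyGetD combo 0 0) (PySem.List.pyGetD combo 1 0) count1 count2).1) pats) pats)
      pats1
  pats2.map (fun p => p)

-- ===== PORT B =====
-- first loop of B: positions of each value, in first-occurrence order (i is the running index)
def pvPosLoop (l : List Int) (pos : PySem.Dict Int (List Int)) (i : Int) : PySem.Dict Int (List Int) :=
  match l with
  | [] => pos
  | d :: ds =>
    if pos.contains d then pvPosLoop ds (pos.insert d (pos.getD d [] ++ [i])) (i + 1)
    else pvPosLoop ds (pos.insert d [i]) (i + 1)

-- second loop of B: the prefix-mask family of one value (m = m + []; m[p] = True; fam.append(m))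
def pvFamLoop (ps : List Int) (fam : List (List Bool)) (m : List Bool) : List (List Bool) :=
  match ps with
  | [] => fam
  | p :: pr =>
    let m' := PySem.List.pySetD (m ++ []) p true
    pvFamLoop pr (fam ++ [m']) m'

def all_possible_keep_patterns_alt (dice : List Int) : List (List Bool) :=
  let n := dice.length
  let pos : PySem.Dict Int (List Int) := pvPosLoop dice PySem.Dict.empty 0
  let masks : PySem.Dict Int (List (List Bool)) :=
    pos.keys.foldl (fun mk v => mk.insert v (pvFamLoop (pos.getD v []) [] (List.replicate n false))) PySem.Dict.empty
  let pats : PySem.Set (List Bool) :=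
    masks.keys.foldl (fun pats v => (masks.getD v []).foldl (fun pats m => PySem.Set.add pats m) pats)
      PySem.Set.empty
  let pats2 : PySem.Set (List Bool) :=
    (PySem.List.combinations pos.keys 2).foldl (fun pats combo =>
      (masks.getD (PySem.List.pyGetD combo 0 0) []).foldl (fun pats m1 =>
        (masks.getD (PySem.List.pyGetD combo 1 0) []).foldl (fun pats m2 =>
          PySem.Set.add pats ((m1.zip m2).map (fun ab => ab.1 || ab.2))) pats) pats) pats
  pats2.map (fun p => p)

-- ===== PRECONDITION & SPEC =====
def Spec_all_possible_keep_patterns (dice : List Int) (out : List (List Bool)) : Prop := out = all_possible_keep_patterns_alt dice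
instance (dice : List Int) (out : List (List Bool)) : Decidable (Spec_all_possible_keep_patterns dice out) := by unfold Spec_all_possible_keep_patterns; infer_instance

-- ===== CLAIM (what is proved, stated in full; the proofs are below) =====
def Claim_equal_all_possible_keep_patterns : Prop := ∀ (dice : List Int), Dom_all_possible_keep_patterns dice → Spec_all_possible_keep_patterns dice (all_possible_keep_patterns dice)

-- ===== LEMMAS AND PROOFS =====

-- ghost: the mask keeping the first j occurrences of v in l
def keepN (l : List Int) (v : Int) (j : Int) : List Bool :=
  match l with
  | [] => []
  | d :: ds => if d == v then decide (0 < j) :: keepN ds v (j - 1) else false :: keepN ds v j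

-- ghost: positions of v in l, the first cell carrying index i
def posFrom (l : List Int) (v : Int) (i : Int) : List Int :=
  match l with
  | [] => []
  | d :: ds => if d == v then i :: posFrom ds v (i + 1) else posFrom ds v (i + 1)

-- ghost: the canonical per-value mask family
def mList (dice : List Int) (v : Int) : List (List Bool) :=
  (List.range' 1 (dice.count v)).map (fun k : Nat => keepN dice v (k : Int))

theorem keepN_nonpos (l : List Int) (v : Int) (j : Int) (h : j ≤ 0) :
    keepN l v j = List.replicate l.length false := by
  induction l generalizing j with
  | nil => rfl
  | cons d ds ih =>
    by_cases hd : d = v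
    · simp [keepN, hd, List.replicate_succ, ih (j - 1) (by omega), show ¬ (0 < j) by omega]
    · simp [keepN, hd, List.replicate_succ, ih j h]

theorem scan1_go (dice : List Int) (num keep : Int) :
    ∀ (p : List Bool) (c : Int),
      (dice.foldl (fun st d =>
        if d == num && st.2 < keep then (st.1 ++ [true], st.2 + 1)
        else (st.1 ++ [false], st.2)) (p, c)).1 = p ++ keepN dice num (keep - c) := by
  induction dice with
  | nil => intro p c; simp [keepN]
  | cons d ds ih =>
    intro p c
    simp only [List.foldl_cons]
    by_cases hd : d = num
    · by_cases hc : c < keep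
      · rw [if_pos (by simp [hd, hc])]
        rw [ih (p ++ [true]) (c + 1)]
        simp [keepN, hd, hc, show (0:Int) < keep - c by omega,
          show keep - (c + 1) = keep - c - 1 by ring]
      · rw [if_neg (by simp [hc])]
        rw [ih (p ++ [false]) c]
        have h1 : keepN ds num (keep - c) = List.replicate ds.length false :=
          keepN_nonpos _ _ _ (by omega)
        have h2 : keepN ds num (keep - c - 1) = List.replicate ds.length false :=
          keepN_nonpos _ _ _ (by omega)
        simp [keepN, hd, hc, show ¬ (0:Int) < keep - c by omega, h1, h2,
          show keep ≤ c by omega]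
    · rw [if_neg (by simp [hd])]
      rw [ih (p ++ [false]) c]
      simp [keepN, hd]

theorem scan1_eq (dice : List Int) (num keep : Int) :
    (pvScan1 dice num keep).1 = keepN dice num keep := by
  have := scan1_go dice num keep [] 0
  simpa [pvScan1] using this

theorem scan2_go (dice : List Int) (v1 v2 c1 c2 : Int) (hne : v1 ≠ v2) :
    ∀ (p : List Bool) (a1 a2 : Int),
      (dice.foldl (fun st d =>
        if d == v1 && st.2.1 < c1 then (st.1 ++ [true], st.2.1 + 1, st.2.2)
        else if d == v2 && st.2.2 < c2 then (st.1 ++ [true], st.2.1, st.2.2 + 1)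
        else (st.1 ++ [false], st.2)) (p, a1, a2)).1
      = p ++ ((keepN dice v1 (c1 - a1)).zip (keepN dice v2 (c2 - a2))).map (fun ab => ab.1 || ab.2) := by
  have hne' : ¬ v2 = v1 := fun h => hne h.symm
  induction dice with
  | nil => intro p a1 a2; simp [keepN]
  | cons d ds ih =>
    intro p a1 a2
    simp only [List.foldl_cons]
    by_cases hd1 : d = v1
    · have hd2 : ¬ d = v2 := by rw [hd1]; exact hne
      by_cases h1 : a1 < c1
      · rw [if_pos (by simp [hd1, h1])]
        rw [ih (p ++ [true]) (a1 + 1) a2]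
        simp [keepN, hd1, hd2, hne, h1, show (0:Int) < c1 - a1 by omega,
          show c1 - (a1 + 1) = c1 - a1 - 1 by ring]
      · rw [if_neg (by simp [h1]), if_neg (by simp [hd2])]
        rw [ih (p ++ [false]) a1 a2]
        have h1' : keepN ds v1 (c1 - a1) = List.replicate ds.length false :=
          keepN_nonpos _ _ _ (by omega)
        have h2' : keepN ds v1 (c1 - a1 - 1) = List.replicate ds.length false :=
          keepN_nonpos _ _ _ (by omega)
        simp [keepN, hd1, hd2, hne, h1, h1', h2', show ¬ (0:Int) < c1 - a1 by omega,
          show c1 ≤ a1 by omega]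
    · by_cases hd2 : d = v2
      · by_cases h2 : a2 < c2
        · rw [if_neg (by simp [hd1]), if_pos (by simp [hd2, h2])]
          rw [ih (p ++ [true]) a1 (a2 + 1)]
          simp [keepN, hd1, hd2, hne, hne', h2, show (0:Int) < c2 - a2 by omega,
            show c2 - (a2 + 1) = c2 - a2 - 1 by ring]
        · rw [if_neg (by simp [hd1]), if_neg (by simp [h2])]
          rw [ih (p ++ [false]) a1 a2]
          have h1' : keepN ds v2 (c2 - a2) = List.replicate ds.length false :=
            keepN_nonpos _ _ _ (by omega)
          have h2' : keepN ds v2 (c2 - a2 - 1) = List.replicate ds.length false :=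
            keepN_nonpos _ _ _ (by omega)
          simp [keepN, hd1, hd2, hne, hne', h2, h1', h2', show ¬ (0:Int) < c2 - a2 by omega,
            show c2 ≤ a2 by omega]
      · rw [if_neg (by simp [hd1]), if_neg (by simp [hd2])]
        rw [ih (p ++ [false]) a1 a2]
        simp [keepN, hd1, hd2]

theorem scan2_eq (dice : List Int) (v1 v2 c1 c2 : Int) (hne : v1 ≠ v2) :
    (pvScan2 dice v1 v2 c1 c2).1
      = ((keepN dice v1 c1).zip (keepN dice v2 c2)).map (fun ab => ab.1 || ab.2) := by
  have := scan2_go dice v1 v2 c1 c2 hne [] 0 0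
  simpa [pvScan2] using this

theorem posLoop_getD (l : List Int) (v : Int) :
    ∀ (pos : PySem.Dict Int (List Int)) (i : Int),
      (pvPosLoop l pos i).getD v [] = pos.getD v [] ++ posFrom l v i := by
  induction l with
  | nil => intro pos i; simp [pvPosLoop, posFrom]
  | cons d ds ih =>
    intro pos i
    by_cases hc : pos.contains d = true
    · rw [show pvPosLoop (d :: ds) pos i
          = pvPosLoop ds (pos.insert d (pos.getD d [] ++ [i])) (i + 1) by
        simp [pvPosLoop, hc]]
      rw [ih]
      by_cases hv : v = d
      · subst hv
        simp [PySem.Dict.getD_insert, posFrom]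
      · simp [PySem.Dict.getD_insert, hv, posFrom, show ¬ d = v from fun h => hv h.symm]
    · rw [show pvPosLoop (d :: ds) pos i = pvPosLoop ds (pos.insert d [i]) (i + 1) by
        simp [pvPosLoop, hc]]
      rw [ih]
      by_cases hv : v = d
      · subst hv
        simp [PySem.Dict.getD_insert, posFrom,
          PySem.Dict.getD_of_not_contains pos [] (by simpa using hc)]
      · simp [PySem.Dict.getD_insert, hv, posFrom, show ¬ d = v from fun h => hv h.symm]

theorem posLoop_keys (l : List Int) :
    ∀ (pos : PySem.Dict Int (List Int)) (i : Int),
      (pvPosLoop l pos i).keys = PySem.Set.update pos.keys l := by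
  induction l with
  | nil => intro pos i; simp [pvPosLoop, PySem.Set.update]
  | cons d ds ih =>
    intro pos i
    have hupd : PySem.Set.update pos.keys (d :: ds)
        = PySem.Set.update (PySem.Set.add pos.keys d) ds := rfl
    by_cases hc : pos.contains d = true
    · rw [show pvPosLoop (d :: ds) pos i
          = pvPosLoop ds (pos.insert d (pos.getD d [] ++ [i])) (i + 1) by
        simp [pvPosLoop, hc]]
      rw [ih, hupd]
      congr 1
      rw [PySem.Dict.keys_insert_of_contains pos _ hc]
      exact (PySem.Set.add_of_mem ((PySem.Dict.contains_iff_mem_keys pos d).1 hc)).symm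
    · rw [show pvPosLoop (d :: ds) pos i = pvPosLoop ds (pos.insert d [i]) (i + 1) by
        simp [pvPosLoop, hc]]
      rw [ih, hupd]
      congr 1
      rw [PySem.Dict.keys_insert_of_not_contains pos _ (by simpa using hc)]
      exact (PySem.Set.add_of_not_mem
        (fun hm => by simp [(PySem.Dict.contains_iff_mem_keys pos d).2 hm] at hc)).symm

theorem foldl_add_of_nodup {α : Type} [BEq α] [LawfulBEq α] (l : List α) :
    ∀ (s : List α), (s ++ l).Nodup → l.foldl PySem.Set.add s = s ++ l := by
  induction l with
  | nil => intro s _; simp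
  | cons x xs ih =>
    intro s hnd
    have hparts := List.nodup_append.mp hnd
    have hx : x ∉ s := fun hm => hparts.2.2 x hm x (by simp) rfl
    simp only [List.foldl_cons, PySem.Set.add_of_not_mem hx]
    rw [ih (s ++ [x]) (by rwa [← List.append_cons])]
    simp

theorem ofList_self_of_nodup {α : Type} [BEq α] [LawfulBEq α] (l : List α) (h : l.Nodup) :
    PySem.Set.ofList l = l := by
  have := foldl_add_of_nodup l [] (by simpa using h)
  simpa [PySem.Set.ofList_eq_foldl] using this

theorem getD_foldl_insert_fun {ν : Type} (g : Int → ν) (ks : List Int) (x : Int) (dflt : ν) :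
    ∀ (d0 : PySem.Dict Int ν),
      (ks.foldl (fun d k => d.insert k (g k)) d0).getD x dflt
        = if x ∈ ks then g x else d0.getD x dflt := by
  induction ks with
  | nil => intro d0; simp
  | cons k kr ih =>
    intro d0
    simp only [List.foldl_cons]
    rw [ih]
    by_cases hm : x ∈ kr
    · simp [hm]
    · by_cases hx : x = k
      · subst hx; simp [hm, PySem.Dict.getD_insert]
      · simp [hm, hx, PySem.Dict.getD_insert]

theorem famLoop_eq (l : List Int) (v : Int) :
    ∀ (pre : List Bool) (fam0 : List (List Bool)),
      pvFamLoop (posFrom l v (pre.length : Int)) fam0 (pre ++ keepN l v 0)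
        = fam0 ++ (List.range' 1 (l.count v)).map (fun k : Nat => pre ++ keepN l v (k : Int)) := by
  induction l with
  | nil => intro pre fam0; simp [posFrom, keepN, pvFamLoop]
  | cons d ds ih =>
    intro pre fam0
    by_cases hd : d = v
    · subst hd
      have hpf : posFrom (d :: ds) d (pre.length : Int)
          = (pre.length : Int) :: posFrom ds d ((pre.length : Int) + 1) := by simp [posFrom]
      have hneg : keepN ds d (-1 : Int) = keepN ds d 0 := by
        rw [keepN_nonpos _ _ _ (by omega), keepN_nonpos _ _ _ (by omega)]
      have hk0 : keepN (d :: ds) d 0 = false :: keepN ds d 0 := by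
        simp [keepN, hneg]
      rw [hpf, hk0]
      have hm' : PySem.List.pySetD ((pre ++ false :: keepN ds d 0) ++ []) ((pre.length : Nat) : Int) true
          = (pre ++ [true]) ++ keepN ds d 0 := by
        rw [List.append_nil, PySem.List.pySetD_natCast, List.set_append_right _ _ le_rfl]
        simp
      rw [show pvFamLoop ((pre.length : Int) :: posFrom ds d ((pre.length : Int) + 1)) fam0
            (pre ++ false :: keepN ds d 0)
          = pvFamLoop (posFrom ds d ((pre.length : Int) + 1))
              (fam0 ++ [(pre ++ [true]) ++ keepN ds d 0]) ((pre ++ [true]) ++ keepN ds d 0) by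
        simp only [pvFamLoop, hm']]
      have hlen : (((pre ++ [true]).length : Nat) : Int) = (pre.length : Int) + 1 := by
        simp
      have hih := ih (pre ++ [true]) (fam0 ++ [(pre ++ [true]) ++ keepN ds d 0])
      rw [hlen] at hih
      rw [hih]
      have hcnt : (d :: ds).count d = ds.count d + 1 := by simp
      rw [hcnt, List.range'_succ]
      simp only [List.map_cons]
      have hhead : pre ++ keepN (d :: ds) d (1 : Int) = (pre ++ [true]) ++ keepN ds d 0 := by
        have h1 : keepN ds d ((1:Int) - 1) = keepN ds d 0 := by norm_num
        simp [keepN, h1]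
      have htail : (List.range' 2 (ds.count d)).map (fun k : Nat => pre ++ keepN (d :: ds) d (k : Int))
          = (List.range' 1 (ds.count d)).map (fun k : Nat => (pre ++ [true]) ++ keepN ds d (k : Int)) := by
        rw [List.range'_eq_map_range, List.range'_eq_map_range, List.map_map, List.map_map]
        apply List.map_congr_left
        intro i _
        have hk : keepN (d :: ds) d (2 + (i : Int)) = true :: keepN ds d (1 + (i : Int)) := by
          simp [keepN]
          constructor
          · omega
          · rw [show (2 + (i : Int) - 1) = 1 + (i : Int) by ring]
        simp only [Function.comp_apply]
        push_cast
        rw [hk]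
        simp
      rw [htail]
      simp [hhead]
    · have hpf : posFrom (d :: ds) v (pre.length : Int) = posFrom ds v ((pre.length : Int) + 1) := by
        simp [posFrom, hd]
      have hk0 : keepN (d :: ds) v 0 = false :: keepN ds v 0 := by simp [keepN, hd]
      rw [hpf, hk0]
      have hlen : (((pre ++ [false]).length : Nat) : Int) = (pre.length : Int) + 1 := by simp
      have hih := ih (pre ++ [false]) fam0
      rw [hlen] at hih
      rw [show pre ++ false :: keepN ds v 0 = (pre ++ [false]) ++ keepN ds v 0 by simp]
      rw [hih]
      congr 1
      rw [show (d :: ds).count v = ds.count v by simp [List.count_cons, hd]]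
      apply List.map_congr_left
      intro k _
      have hk : keepN (d :: ds) v (k : Int) = false :: keepN ds v (k : Int) := by simp [keepN, hd]
      simp [hk]

theorem pyRange_cast (c : Nat) :
    PySem.List.pyRange 1 ((c : Int) + 1) = (List.range' 1 c).map (fun k : Nat => (k : Int)) := by
  induction c with
  | zero => simpa using PySem.List.pyRange_one_eq_nil (by norm_num)
  | succ c ih =>
    have h1 : ((c + 1 : Nat) : Int) + 1 = ((c : Nat) : Int) + 1 + 1 := by push_cast; ring
    rw [h1, PySem.List.pyRange_one_succ_right (by omega), ih, List.range'_concat]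
    simp only [List.map_append, List.map_cons, List.map_nil]
    congr 2
    push_cast
    ring

theorem A_singles_inner (dice : List Int) (v : Int) (c : Nat) (pats : PySem.Set (List Bool)) :
    (PySem.List.pyRange 0 ((c : Int) + 1)).foldl (fun pats keep_count =>
        if keep_count == 0 then pats else PySem.Set.add pats (pvScan1 dice v keep_count).1) pats
      = ((List.range' 1 c).map (fun k : Nat => keepN dice v (k : Int))).foldl
          (fun pats m => PySem.Set.add pats m) pats := by
  rw [PySem.List.pyRange_one_cons (by omega)]
  rw [List.foldl_cons]
  rw [show (if (0 : Int) == 0 then pats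
        else PySem.Set.add pats (pvScan1 dice v 0).1) = pats by simp]
  rw [show (0 : Int) + 1 = 1 by norm_num]
  rw [pyRange_cast c, List.foldl_map, List.foldl_map]
  apply PySem.List.foldl_congr_mem
  intro acc k hk
  have hk1 : 1 ≤ k := (List.mem_range'_1.mp hk).1
  rw [if_neg (by simp; omega), scan1_eq]

theorem A_pairs_inner (dice : List Int) (a b : Int) (hne : a ≠ b) (pats : PySem.Set (List Bool)) :
    (PySem.List.pyRange 1 ((dice.count a : Int) + 1)).foldl (fun pats count1 =>
      (PySem.List.pyRange 1 ((dice.count b : Int) + 1)).foldl (fun pats count2 =>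
        PySem.Set.add pats (pvScan2 dice a b count1 count2).1) pats) pats
    = (mList dice a).foldl (fun pats m1 => (mList dice b).foldl (fun pats m2 =>
        PySem.Set.add pats ((m1.zip m2).map (fun ab => ab.1 || ab.2))) pats) pats := by
  simp only [pyRange_cast, mList, List.foldl_map]
  apply PySem.List.foldl_congr_mem
  intro acc k1 _
  apply PySem.List.foldl_congr_mem
  intro acc2 k2 _
  rw [scan2_eq dice a b _ _ hne]

theorem foldl_full_congr {α β : Type} (l : List α) (f g : β → α → β) (i1 i2 : β)
    (hi : i1 = i2) (h : ∀ acc : β, ∀ x ∈ l, f acc x = g acc x) :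
    l.foldl f i1 = l.foldl g i2 := by
  subst hi
  exact PySem.List.foldl_congr_mem l f g i1 h

theorem AB_eq (dice : List Int) :
    all_possible_keep_patterns dice = all_possible_keep_patterns_alt dice := by
  have hnd : (PySem.Set.ofList dice).Nodup := PySem.Set.nodup_ofList dice
  have hofl : PySem.Set.ofList (PySem.Set.ofList dice) = PySem.Set.ofList dice :=
    ofList_self_of_nodup _ hnd
  have hcnt : ∀ x : Int, PySem.List.count dice x = dice.count x := fun _ => rfl
  have hpkeys : (pvPosLoop dice PySem.Dict.empty 0).keys = PySem.Set.ofList dice := by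
    rw [posLoop_keys]
    simp [PySem.Dict.keys_empty, PySem.Set.update_nil_left]
  have hpgetD : ∀ v : Int, (pvPosLoop dice PySem.Dict.empty 0).getD v [] = posFrom dice v 0 := by
    intro v; rw [posLoop_getD]; simp
  have hcget : ∀ v ∈ PySem.Set.ofList dice,
      ((PySem.Set.ofList dice).foldl
          (fun d num => d.insert num ((dice.count num : Nat) : Int)) PySem.Dict.empty).getD v 0
        = ((dice.count v : Nat) : Int) := by
    intro v hv
    rw [getD_foldl_insert_fun (g := fun k => ((dice.count k : Nat) : Int))]
    simp [hv]
  have hmget : ∀ v ∈ PySem.Set.ofList dice,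
      ((PySem.Set.ofList dice).foldl
          (fun mk v => mk.insert v
            (pvFamLoop (posFrom dice v 0) [] (List.replicate dice.length false)))
          PySem.Dict.empty).getD v []
        = mList dice v := by
    intro v hv
    rw [getD_foldl_insert_fun
      (g := fun k => pvFamLoop (posFrom dice k 0) [] (List.replicate dice.length false))]
    rw [if_pos hv]
    rw [show List.replicate dice.length false = keepN dice v 0 from
      (keepN_nonpos dice v 0 le_rfl).symm]
    have hfl := famLoop_eq dice v [] []
    simpa [mList] using hfl
  simp only [all_possible_keep_patterns, all_possible_keep_patterns_alt,
    PySem.Dict.keys_foldl_insert, PySem.Dict.keys_empty, PySem.Set.update_nil_left,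
    hpkeys, hpgetD, hofl, hcnt]
  refine congrArg (List.map (fun p => p)) ?_
  refine foldl_full_congr _ _ _ _ _ ?_ ?_
  · -- the single-value pattern sets agree
    refine PySem.List.foldl_congr_mem _ _ _ _ ?_
    intro acc v hv
    rw [hcget v hv, hmget v hv]
    exact A_singles_inner dice v (dice.count v) acc
  · -- the pair pattern loops agree on every combo
    intro acc combo hcombo
    obtain ⟨hsub, hlen⟩ := (PySem.List.mem_combinations_iff _ _ _).mp hcombo
    obtain ⟨a, b, rfl⟩ := List.length_eq_two.mp hlen
    have hain : a ∈ PySem.Set.ofList dice := hsub.subset (by simp)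
    have hbin : b ∈ PySem.Set.ofList dice := hsub.subset (by simp)
    have hab : a ≠ b := by
      intro h
      subst h
      have hnd2 := hsub.nodup hnd
      simp at hnd2
    have hgb : PySem.List.pyGetD [a, b] 1 0 = b := by
      have := PySem.List.pyGetD_ofNat [a, b] 1 0 (by simp)
      simpa using this
    simp only [PySem.List.pyGetD_zero_cons, hgb]
    rw [hmget a hain, hmget b hbin]
    exact A_pairs_inner dice a b hab acc

-- ===== VERDICT (by name: the statement is the Claim_ definition above) =====
theorem all_possible_keep_patterns_spec : Claim_equal_all_possible_keep_patterns := by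
  intro dice _
  show _ = _
  exact AB_eq dice
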